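-- pv_equiv track=rewrite | github.com/wyk18703232953/myResearch | codeComplex/data/filteredData/python/linear/python_linear_0245.py | solve
-- ===== SOURCE A (Python) =====
-- from collections import Counter
--
-- def solve(n, ribbons):
--     L = len(ribbons[0])
--     a = [Counter(r).most_common(1)[0][1] for r in ribbons]
--
--     r = sorted([(x, i) for i, x in enumerate(a)], reverse=True)
--
--     if n == 1:
--         c = Counter(a)
--         if c[L - 1] == 1:
--             for i in range(3):
--                 if a[i] == L - 1:
--                     return i
--         if c[L - 1] > 1:
--             return 3
--         if c[L] + c[L - 2] == 1:
--             for i in range(3):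
--                 if a[i] == L or a[i] == L - 2:
--                     return i
--         if c[L] + c[L - 2] > 1:
--             return 3
--
--     if r[1][0] == r[0][0]:
--         return 3
--     if r[1][0] + n >= L:
--         return 3
--     return r[0][1]
-- ===== SOURCE B (Python) =====
-- from collections import Counter
--
-- def solve(n, ribbons):
--     L = len(ribbons[0])
--     # per-ribbon max character frequency, via max over the counter's values
--     a = [max(Counter(r).values()) for r in ribbons]
--
--     if n == 1:
--         near = a.count(L - 1)
--         if near == 1:
--             hit = next((i for i in range(3) if a[i] == L - 1), None)
--             if hit is not None:
--                 return hit
--         if near > 1: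
--             return 3
--         far = a.count(L) + a.count(L - 2)
--         if far == 1:
--             hit = next((i for i in range(3) if a[i] == L or a[i] == L - 2), None)
--             if hit is not None:
--                 return hit
--         if far > 1:
--             return 3
--
--     # one linear pass keeping the two largest (value, index) pairs (lexicographic order)
--     b0, b1 = (a[0], 0), (a[1], 1)
--     if b1 > b0:
--         b0, b1 = b1, b0
--     for j, v in list(enumerate(a))[2:]:
--         p = (v, j)
--         if p > b0:
--             b0, b1 = p, b0
--         elif p > b1:
--             b1 = p
--
--     if b1[0] == b0[0]:
--         return 3
--     if b1[0] + n >= L: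
--         return 3
--     return b0[1]
-- ===== Notes on version B (the rewrite author's own statement) =====
-- stated objective: faster
-- what changed: B replaces A's build-and-sort of all (value,index) pairs by a single linear pass that maintains the two lexicographically largest pairs, and replaces most_common(1)/Counter lookups by direct max-over-values and list.count scans.
import Mathlib
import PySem

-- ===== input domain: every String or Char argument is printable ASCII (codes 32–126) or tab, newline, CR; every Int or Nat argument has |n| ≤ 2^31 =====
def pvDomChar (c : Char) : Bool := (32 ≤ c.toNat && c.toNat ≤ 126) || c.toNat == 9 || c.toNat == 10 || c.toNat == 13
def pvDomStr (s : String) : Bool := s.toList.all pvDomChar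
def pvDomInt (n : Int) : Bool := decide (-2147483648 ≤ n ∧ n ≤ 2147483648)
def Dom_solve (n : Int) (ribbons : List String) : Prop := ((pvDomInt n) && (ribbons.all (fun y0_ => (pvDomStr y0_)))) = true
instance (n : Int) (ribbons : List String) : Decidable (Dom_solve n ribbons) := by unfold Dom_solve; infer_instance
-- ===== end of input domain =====

-- B replaces A's sort of all (value,index) pairs by one linear pass keeping the two largest pairs,
-- and the Counter-based lookups (most_common(1), Counter(a)) by direct max/list.count scans.

-- ===== PORT A =====

-- Counter(r).most_common(1)[0][1]: most_common orders the counter's items by count, descending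
-- (stable, so ties keep insertion order); [0] raises IndexError on an empty ribbon (excluded by
-- Pre_), modelled by headD; [1] takes the count.
def maxFreqA (s : String) : Int :=
  ((PySem.List.sorted (PySem.Dict.counter s.toList).items (fun p => p.2) true).headD ('a', 0)).2

-- 'for i in range(3): if q(a[i]): return i' (fall through = none); a[i] via pyGetD — an
-- out-of-range access is unreachable on Pre_ inputs (the matching index is always < len(a) there)
def scan3A (q : Int → Bool) (a : List Int) : Option Int :=
  if q (PySem.List.pyGetD a 0 0) then some 0
  else if q (PySem.List.pyGetD a 1 0) then some 1
  else if q (PySem.List.pyGetD a 2 0) then some 2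
  else none

-- the body of A's 'if n == 1:' block, with early 'return i' modelled as Option
def tryN1A (L : Int) (a : List Int) : Option Int :=
  let c := PySem.Dict.counter a
  match (if c.getD (L - 1) 0 = 1 then scan3A (fun x => decide (x = L - 1)) a else none) with
  | some i => some i
  | none =>
    if c.getD (L - 1) 0 > 1 then some 3
    else
      match (if c.getD L 0 + c.getD (L - 2) 0 = 1 then
               scan3A (fun x => x == L || x == L - 2) a else none) with
      | some i => some i
      | none => if c.getD L 0 + c.getD (L - 2) 0 > 1 then some 3 else none

def solve (n : Int) (ribbons : List String) : Int :=
  let L : Int := PySem.Str.len (ribbons.headD "")   -- len(ribbons[0]); [] raises (excluded by Pre_)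
  let a : List Int := ribbons.map maxFreqA
  -- r = sorted([(x, i) for i, x in enumerate(a)], reverse=True)
  let r : List (Int × Int) :=
    PySem.List.sorted2 ((PySem.List.enumerate a 0).map (fun p => (p.2, p.1)))
      (fun q => q.1) (fun q => q.2) true
  match (if n = 1 then tryN1A L a else none) with
  | some v => v
  | none =>
    let r0 := r.headD (0, 0)                       -- r[0]
    let r1 := PySem.List.pyGetD r 1 (0, 0)         -- r[1]; raises when < 2 ribbons (excluded by Pre_)
    if r1.1 = r0.1 then 3
    else if r1.1 + n ≥ L then 3
    else r0.2

-- ===== PORT B =====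

-- max(Counter(r).values()); max() raises ValueError on an empty ribbon (excluded by Pre_)
def maxFreqB (s : String) : Int :=
  match PySem.List.max? (PySem.Dict.counter s.toList).values (fun v => v) with
  | some v => v
  | none => 0

-- Python's lexicographic '>' on int pairs
def pairGT (p q : Int × Int) : Bool :=
  decide (q.1 < p.1) || (decide (p.1 = q.1) && decide (q.2 < p.2))

-- next((i for i in range(3) if q(a[i])), None)
def scan3B (q : Int → Bool) (a : List Int) : Option Int :=
  ((List.range 3).find? (fun (i : Nat) => q (PySem.List.pyGetD a (i : Int) 0))).map (fun i => (i : Int))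

-- the body of B's 'if n == 1:' block (a.count instead of Counter), early returns as Option
def tryN1B (L : Int) (a : List Int) : Option Int :=
  match (if PySem.List.count a (L - 1) = 1 then scan3B (fun x => decide (x = L - 1)) a else none) with
  | some i => some i
  | none =>
    if PySem.List.count a (L - 1) > 1 then some 3
    else
      match (if PySem.List.count a L + PySem.List.count a (L - 2) = 1 then
               scan3B (fun x => x == L || x == L - 2) a else none) with
      | some i => some i
      | none => if PySem.List.count a L + PySem.List.count a (L - 2) > 1 then some 3 else none

-- one step of the loop keeping the two largest pairs
def top2Step (st : (Int × Int) × (Int × Int)) (p : Int × Int) : (Int × Int) × (Int × Int) :=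
  if pairGT p st.1 then (p, st.1)
  else if pairGT p st.2 then (st.1, p)
  else st

def solve_alt (n : Int) (ribbons : List String) : Int :=
  let L : Int := PySem.Str.len (ribbons.headD "")
  let a : List Int := ribbons.map maxFreqB
  match (if n = 1 then tryN1B L a else none) with
  | some v => v
  | none =>
    let b0 : Int × Int := (PySem.List.pyGetD a 0 0, 0)   -- (a[0], 0); a[0]/a[1] raise when < 2 ribbons
    let b1 : Int × Int := (PySem.List.pyGetD a 1 0, 1)   -- (excluded by Pre_)
    let init := if pairGT b1 b0 then (b1, b0) else (b0, b1)
    let st := ((PySem.List.enumerate a 0).drop 2).foldl (fun st p => top2Step st (p.2, p.1)) init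
    if st.2.1 = st.1.1 then 3
    else if st.2.1 + n ≥ L then 3
    else st.1.2

-- ===== PRECONDITION & SPEC =====

-- Pre_ is exactly where A returns: every ribbon nonempty (else Counter(...).most_common(1)[0]
-- raises IndexError), and either at least two ribbons (else r[1] raises IndexError), or a single
-- ribbon with n == 1 whose most frequent character fills all but at most two positions — exactly
-- then the n == 1 block returns before r[1] is evaluated.
def Pre_solve (n : Int) (ribbons : List String) : Prop :=
  (∀ s ∈ ribbons, s ≠ "") ∧
  (2 ≤ ribbons.length ∨
    (n = 1 ∧ ribbons.length = 1 ∧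
      ∃ c ∈ (ribbons.headD "").toList,
        ((ribbons.headD "").toList.length : Int) - 2 ≤ ((ribbons.headD "").toList.count c : Int)))
instance (n : Int) (ribbons : List String) : Decidable (Pre_solve n ribbons) := by
  unfold Pre_solve; infer_instance

def pvWitness_solve : Int × List String := (5, ["aab", "bbc"])

def Spec_solve (n : Int) (ribbons : List String) (out : Int) : Prop := out = solve_alt n ribbons
instance (n : Int) (ribbons : List String) (out : Int) : Decidable (Spec_solve n ribbons out) := by
  unfold Spec_solve; infer_instance

-- ===== CLAIM (what is proved, stated in full; the proofs are below) =====
def Claim_equal_solve : Prop := ∀ (n : Int) (ribbons : List String),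
  Dom_solve n ribbons → Pre_solve n ribbons → Spec_solve n ribbons (solve n ribbons)

-- ===== LEMMAS AND PROOFS =====

-- the two per-ribbon maxima agree: head of the count-sorted items = max of the values
theorem maxFreq_eq (s : String) : maxFreqA s = maxFreqB s := by
  unfold maxFreqA maxFreqB
  cases hs : PySem.List.sorted (PySem.Dict.counter s.toList).items (fun p => p.2) true with
  | nil =>
    have hitems : (PySem.Dict.counter s.toList).items = [] :=
      (PySem.List.sorted_eq_nil_iff _ _ _).mp hs
    have hv : (PySem.Dict.counter s.toList).values = [] := by
      have : (PySem.Dict.counter s.toList).values = (PySem.Dict.counter s.toList).items.map (·.2) := rfl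
      rw [this, hitems]; rfl
    rw [hv]
    simp [PySem.List.max?]
  | cons m t =>
    have hv : (PySem.Dict.counter s.toList).values = (PySem.Dict.counter s.toList).items.map (·.2) := rfl
    cases hmx : PySem.List.max? (PySem.Dict.counter s.toList).values (fun v => v) with
    | none =>
      have : (PySem.Dict.counter s.toList).values = [] :=
        (PySem.List.max?_eq_none_iff _ _).mp hmx
      rw [hv] at this
      have : (PySem.Dict.counter s.toList).items = [] := by
        cases h : (PySem.Dict.counter s.toList).items with
        | nil => rfl
        | cons p ps => rw [h] at this; simp at this
      rw [this] at hs
      simp [PySem.List.sorted] at hs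
    | some v =>
      have hvmem : v ∈ (PySem.Dict.counter s.toList).values := PySem.List.max?_mem hmx
      rw [hv] at hvmem
      obtain ⟨p, hp, hpv⟩ := List.mem_map.mp hvmem
      have h1 : v ≤ m.2 := by
        have := PySem.List.key_head_sorted_rev_ge _ _ hs p hp
        omega
      have h2 : m.2 ≤ v := by
        have hm : m ∈ (PySem.Dict.counter s.toList).items := by
          have : m ∈ PySem.List.sorted (PySem.Dict.counter s.toList).items (fun p => p.2) true := by
            rw [hs]; exact List.mem_cons_self
          exact (PySem.List.mem_sorted _ _ _ _).mp this
        have : m.2 ∈ (PySem.Dict.counter s.toList).values := by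
          rw [hv]; exact List.mem_map.mpr ⟨m, hm, rfl⟩
        exact PySem.List.max?_isMax hmx m.2 this
      simp [List.headD]
      omega

theorem scan3_eq (q : Int → Bool) (a : List Int) : scan3A q a = scan3B q a := by
  unfold scan3A scan3B
  rw [show List.range 3 = [0, 1, 2] from rfl,
    List.find?_cons, List.find?_cons, List.find?_cons]
  cases h0 : q (PySem.List.pyGetD a 0 0) <;>
    cases h1 : q (PySem.List.pyGetD a 1 0) <;>
      cases h2 : q (PySem.List.pyGetD a 2 0) <;>
        simp [h0, h1, h2, show ((0 : Nat) : Int) = 0 from rfl,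
          show ((1 : Nat) : Int) = 1 from rfl, show ((2 : Nat) : Int) = 2 from rfl]

theorem tryN1_eq (L : Int) (a : List Int) : tryN1A L a = tryN1B L a := by
  unfold tryN1A tryN1B
  simp only [PySem.Dict.getD_counter, PySem.List.count_eq, scan3_eq]
  norm_cast

-- the comparison sorted2(reverse=True) inserts with is exactly Python's '>' on int pairs
theorem bef_eq_pairGT (p q : Int × Int) :
    (decide (q.1 < p.1) || (!decide (p.1 < q.1) && decide (q.2 < p.2))) = pairGT p q := by
  unfold pairGT
  rcases lt_trichotomy p.1 q.1 with h | h | h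
  · simp [h, not_lt_of_gt h, ne_of_lt h]
  · simp [h, lt_irrefl]
  · simp [h, not_lt_of_gt h]

-- folding insertBy into a ≥2-element accumulator tracks exactly the top-2 state machine
theorem top2_fold (ps : List (Int × Int)) :
    ∀ (b0 b1 : Int × Int) (rest : List (Int × Int)),
      ∃ rest', ps.foldl (fun acc x => PySem.List.insertBy pairGT x acc) (b0 :: b1 :: rest) =
        (ps.foldl top2Step (b0, b1)).1 :: (ps.foldl top2Step (b0, b1)).2 :: rest' := by
  induction ps with
  | nil => intro b0 b1 rest; exact ⟨rest, rfl⟩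
  | cons p ps ih =>
    intro b0 b1 rest
    have hins : PySem.List.insertBy pairGT p (b0 :: b1 :: rest) =
        if pairGT p b0 then p :: b0 :: b1 :: rest
        else b0 :: (if pairGT p b1 then p :: b1 :: rest
                    else b1 :: PySem.List.insertBy pairGT p rest) := rfl
    have hstep : top2Step (b0, b1) p =
        if pairGT p b0 then (p, b0) else if pairGT p b1 then (b0, p) else (b0, b1) := rfl
    simp only [List.foldl_cons, hins, hstep]
    cases hg0 : pairGT p b0 with
    | true => simpa using ih p b0 (b1 :: rest)
    | false =>
      cases hg1 : pairGT p b1 with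
      | true => simpa using ih b0 p (b1 :: rest)
      | false => simpa using ih b0 b1 (PySem.List.insertBy pairGT p rest)

-- sorted2 … reverse=True is the insertBy fold with Python's pair '>'
theorem sorted2_rev_eq (xs : List (Int × Int)) :
    PySem.List.sorted2 xs (fun q => q.1) (fun q => q.2) true =
      xs.foldl (fun acc x => PySem.List.insertBy pairGT x acc) [] := by
  have : (fun (a b : Int × Int) =>
      (decide (b.1 < a.1) || (!decide (a.1 < b.1) && decide (b.2 < a.2)))) = pairGT := by
    funext a b; exact bef_eq_pairGT a b
  show xs.foldl (fun acc x => PySem.List.insertBy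
      (fun a b => decide (b.1 < a.1) || (!decide (a.1 < b.1) && decide (b.2 < a.2))) x acc) [] = _
  rw [this]

-- computing the n == 1 block on a one-element list whose entry is L, L-1 or L-2
theorem tryN1B_compute (L m : Int) (h : m = L - 1 ∨ m = L ∨ m = L - 2) :
    tryN1B L [m] = some 0 := by
  rcases h with h | h | h <;> rw [h] <;>
    simp [tryN1B, scan3B, PySem.List.count_eq, List.count_cons, List.count_nil,
      show List.range 3 = [0, 1, 2] from rfl, List.find?_cons,
      show ((0 : Nat) : Int) = 0 from rfl,
      show L - 1 ≠ L by omega, show L - 1 ≠ L - 2 by omega,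
      show L ≠ L - 1 by omega, show L ≠ L - 2 by omega,
      show L - 2 ≠ L - 1 by omega, show L - 2 ≠ L by omega]

-- the max over the counter's values bounds every character count and is itself a count
theorem maxFreqB_bounds (s : String) (hs : s.toList ≠ []) :
    (∀ c ∈ s.toList, (s.toList.count c : Int) ≤ maxFreqB s) ∧
    maxFreqB s ≤ (s.toList.length : Int) := by
  unfold maxFreqB
  have hv : (PySem.Dict.counter s.toList).values =
      (PySem.Dict.counter s.toList).items.map (·.2) := rfl
  have hitems := PySem.Dict.items_counter s.toList
  cases hmx : PySem.List.max? (PySem.Dict.counter s.toList).values (fun v => v) with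
  | none =>
    exfalso
    have hnil : (PySem.Dict.counter s.toList).values = [] :=
      (PySem.List.max?_eq_none_iff _ _).mp hmx
    obtain ⟨c, hc⟩ := List.exists_mem_of_ne_nil _ hs
    have hcs : c ∈ PySem.Set.ofList s.toList := (PySem.Set.mem_ofList _ _).mpr hc
    have : ((s.toList.count c : Int)) ∈ (PySem.Dict.counter s.toList).values := by
      rw [hv, hitems, List.map_map]
      exact List.mem_map.mpr ⟨c, hcs, rfl⟩
    rw [hnil] at this
    simp at this
  | some m =>
    constructor
    · intro c hc
      have hcs : c ∈ PySem.Set.ofList s.toList := (PySem.Set.mem_ofList _ _).mpr hc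
      have hmem : ((s.toList.count c : Int)) ∈ (PySem.Dict.counter s.toList).values := by
        rw [hv, hitems, List.map_map]
        exact List.mem_map.mpr ⟨c, hcs, rfl⟩
      exact PySem.List.max?_isMax hmx _ hmem
    · show m ≤ (s.toList.length : Int)
      have hm : m ∈ (PySem.Dict.counter s.toList).values := PySem.List.max?_mem hmx
      rw [hv, hitems, List.map_map] at hm
      obtain ⟨k, _, hk⟩ := List.mem_map.mp hm
      have hcle : List.count k s.toList ≤ s.toList.length := List.count_le_length
      have hk' : ((List.count k s.toList : Nat) : Int) = m := by simpa using hk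
      omega

-- on a single admitted ribbon, the n == 1 block always decides (returns 0)
theorem tryN1B_single (s : String) (hs : s ≠ "")
    (hcond : ∃ c ∈ s.toList, (s.toList.length : Int) - 2 ≤ (s.toList.count c : Int)) :
    tryN1B (PySem.Str.len s) [maxFreqB s] = some 0 := by
  have hnl : s.toList ≠ [] := by simp [hs]
  obtain ⟨hub, hle⟩ := maxFreqB_bounds s hnl
  obtain ⟨c, hc, hcnt⟩ := hcond
  have h1 : (s.toList.count c : Int) ≤ maxFreqB s := hub c hc
  rw [PySem.Str.len_eq]
  exact tryN1B_compute _ _ (by omega)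

-- the post-block tails of the two ports agree on every list of ≥ 2 maxima
theorem tail_eq (n L x y : Int) (t : List Int) :
    (let a := x :: y :: t
     let r := PySem.List.sorted2 ((PySem.List.enumerate a 0).map (fun p => (p.2, p.1)))
       (fun q => q.1) (fun q => q.2) true
     let r0 := r.headD (0, 0)
     let r1 := PySem.List.pyGetD r 1 (0, 0)
     if r1.1 = r0.1 then (3 : Int) else if r1.1 + n ≥ L then 3 else r0.2) =
    (let a := x :: y :: t
     let b0 : Int × Int := (PySem.List.pyGetD a 0 0, 0)
     let b1 : Int × Int := (PySem.List.pyGetD a 1 0, 1)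
     let init := if pairGT b1 b0 then (b1, b0) else (b0, b1)
     let st := ((PySem.List.enumerate a 0).drop 2).foldl (fun st p => top2Step st (p.2, p.1)) init
     if st.2.1 = st.1.1 then (3 : Int) else if st.2.1 + n ≥ L then 3 else st.1.2) := by
  have he : PySem.List.enumerate (x :: y :: t) 0 = (0, x) :: (1, y) :: PySem.List.enumerate t 2 := by
    rw [PySem.List.enumerate_cons, PySem.List.enumerate_cons]
    norm_num
  have hg0 : PySem.List.pyGetD (x :: y :: t) (0 : Int) 0 = x := PySem.List.pyGetD_zero_cons _ _ _
  have hg1 : PySem.List.pyGetD (x :: y :: t) (1 : Int) 0 = y := by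
    simp [PySem.List.pyGetD_ofNat']
  simp only [he, hg0, hg1, List.map_cons, List.drop_succ_cons, List.drop_zero]
  set ps := (PySem.List.enumerate t 2).map (fun p : Int × Int => (p.2, p.1)) with hps
  set init : (Int × Int) × (Int × Int) :=
    (if pairGT (y, 1) (x, 0) then (((y, 1) : Int × Int), ((x, 0) : Int × Int))
     else ((x, 0), (y, 1))) with hinit
  have hbase : PySem.List.sorted2 ((x, 0) :: (y, 1) :: ps) (fun q => q.1) (fun q => q.2) true =
      ps.foldl (fun acc p => PySem.List.insertBy pairGT p acc) [init.1, init.2] := by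
    rw [sorted2_rev_eq]
    simp only [List.foldl_cons]
    have h1 : PySem.List.insertBy pairGT (x, 0) ([] : List (Int × Int)) = [(x, 0)] := rfl
    have h2 : PySem.List.insertBy pairGT (y, 1) [(x, 0)] =
        if pairGT (y, 1) (x, 0) then [(y, 1), (x, 0)] else [(x, 0), (y, 1)] := rfl
    rw [h1, h2, hinit]
    cases pairGT (y, 1) (x, 0) <;> simp
  obtain ⟨rest', hrest⟩ := top2_fold ps init.1 init.2 []
  have hst : (PySem.List.enumerate t 2).foldl (fun st p => top2Step st (p.2, p.1)) init =
      ps.foldl top2Step init := by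
    rw [hps, List.foldl_map]
  have hinit_eta : (init.1, init.2) = init := rfl
  rw [hbase]
  rw [show ([init.1, init.2] : List (Int × Int)) = init.1 :: init.2 :: [] from rfl]
  rw [hrest, hst, hinit_eta]
  set c := ps.foldl top2Step init with hc
  have hhead : (c.1 :: c.2 :: rest').headD (0, 0) = c.1 := rfl
  have hsec : PySem.List.pyGetD (c.1 :: c.2 :: rest') (1 : Int) (0, 0) = c.2 := by
    simp [PySem.List.pyGetD_ofNat']
  rw [hhead, hsec]

-- ===== VERDICT (by name: the statement is the Claim_ definition above) =====
theorem solve_spec : Claim_equal_solve := by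
  intro n ribbons _ hpre
  unfold Spec_solve
  simp only [solve, solve_alt]
  rw [show maxFreqA = maxFreqB from funext maxFreq_eq,
    show tryN1A = tryN1B from funext (fun L => funext (tryN1_eq L))]
  cases hblk : (if n = 1 then
      tryN1B (PySem.Str.len (ribbons.headD "")) (ribbons.map maxFreqB) else none) with
  | some v => rfl
  | none =>
    have hlen : 2 ≤ (ribbons.map maxFreqB).length := by
      rcases hpre.2 with h2 | ⟨hn1, hlen1, c, hc, hcnt⟩
      · simpa using h2
      · exfalso
        obtain ⟨s, hribs⟩ : ∃ s, ribbons = [s] := by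
          cases hr : ribbons with
          | nil => rw [hr] at hlen1; simp at hlen1
          | cons z zs =>
            cases hz : zs with
            | nil => exact ⟨z, rfl⟩
            | cons w ws => rw [hr, hz] at hlen1; simp at hlen1
        have hne : s ≠ "" := hpre.1 s (by rw [hribs]; exact List.mem_cons_self)
        have hd : ribbons.headD "" = s := by rw [hribs]; rfl
        have hsingle := tryN1B_single s hne
          ⟨c, by rwa [hd] at hc, by rwa [hd] at hcnt⟩
        rw [hn1, if_pos (rfl : (1 : Int) = 1), hribs] at hblk
        simp only [show ([s].headD "") = s from rfl, List.map_cons, List.map_nil] at hblk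
        rw [hsingle] at hblk
        simp at hblk
    obtain ⟨x, y, t, hxyt⟩ : ∃ x y t, ribbons.map maxFreqB = x :: y :: t := by
      cases h1 : ribbons.map maxFreqB with
      | nil => rw [h1] at hlen; simp at hlen
      | cons x rest =>
        cases h2 : rest with
        | nil => rw [h1, h2] at hlen; simp at hlen
        | cons y t => exact ⟨x, y, t, rfl⟩
    rw [hxyt]
    exact tail_eq n (PySem.Str.len (ribbons.headD "")) x y t
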